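-- pv_equiv track=rewrite | github.com/kuntito/LeetcodeGrind | grind__active/237 (number of ways to select buildings)/237a.py | getTypeOne
-- ===== SOURCE A (Python) =====
-- def getTypeOne(zerosOnes, chars):
--     pass
--     # to get type one, iterate in reverse
--     # create result array, `arr`
--
--     dim = len(chars)
--     arr = [0 for _ in range(dim)]
--
--     # for each val that's '0'
--     # set `arr[i] = the number of ones in zerosOnes[i + 1][1]`
--     for i in range(dim - 2, -1, -1):
--         bit = chars[i]
--         if bit == '0':
--             arr[i] = zerosOnes[i+1][1]
--         arr[i] += arr[i + 1]
--
--     return arr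
-- ===== SOURCE B (Python) =====
-- def getTypeOne(zerosOnes, chars):
--     # Forward algorithm via the complement identity suffix(i) = total - prefix(i):
--     # no reverse traversal and no preallocated array mutation.
--     n = len(chars)
--
--     def val(i):
--         return zerosOnes[i + 1][1] if i < n - 1 and chars[i] == '0' else 0
--
--     total = sum(val(i) for i in range(n))
--     out = []
--     pref = 0
--     for i in range(n):
--         out.append(total - pref)
--         pref += val(i)
--     return out
-- ===== Notes on version B (the rewrite author's own statement) =====
-- stated objective: alternative
-- what changed: A computes suffix sums in one backward loop mutating a preallocated array by index; B never traverses backwards: it computes the grand total of per-index contributions in a forward pass and then emits each entry in a second forward pass as total - running_prefix, using the identity suffix(i) = total - prefix(i).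
import Mathlib
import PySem

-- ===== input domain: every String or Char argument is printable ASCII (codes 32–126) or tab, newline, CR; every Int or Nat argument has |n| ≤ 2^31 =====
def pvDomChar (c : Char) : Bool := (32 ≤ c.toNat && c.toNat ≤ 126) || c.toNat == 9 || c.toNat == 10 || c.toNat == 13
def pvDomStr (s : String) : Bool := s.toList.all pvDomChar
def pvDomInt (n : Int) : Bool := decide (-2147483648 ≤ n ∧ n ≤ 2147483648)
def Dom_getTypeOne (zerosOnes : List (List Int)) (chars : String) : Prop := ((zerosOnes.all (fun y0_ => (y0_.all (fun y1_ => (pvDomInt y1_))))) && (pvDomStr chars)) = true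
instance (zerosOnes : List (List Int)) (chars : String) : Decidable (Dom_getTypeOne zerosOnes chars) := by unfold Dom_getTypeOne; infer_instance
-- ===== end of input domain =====

-- B replaces A's backward accumulating loop by two forward passes using the
-- complement identity suffix(i) = total - prefix(i); no speed claim (alternative).

-- ===== PORT A =====
-- literal port of A: preallocate arr of zeros, loop i = dim-2 .. 0, conditionally
-- set arr[i] from zerosOnes[i+1][1], then arr[i] += arr[i+1].
-- pyGetD/pySetD are the total forms of Python indexing; Pre_ excludes the inputs
-- where the Python raises IndexError.
def getTypeOne (zerosOnes : List (List Int)) (chars : String) : List Int :=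
  let dim : Int := (chars.toList.length : Int)
  let arr : List Int := (List.range dim.toNat).map (fun _ => 0)
  (PySem.List.pyRange (dim - 2) (-1) (-1)).foldl
    (fun arr i =>
      let bit := PySem.Str.pyGet? chars i
      let arr :=
        if bit = some '0' then
          PySem.List.pySetD arr i (PySem.List.pyGetD (PySem.List.pyGetD zerosOnes (i + 1) []) 1 0)
        else arr
      PySem.List.pySetD arr i (PySem.List.pyGetD arr i 0 + PySem.List.pyGetD arr (i + 1) 0))
    arr

-- ===== PORT B =====
-- Source B's helper val(i): zerosOnes[i+1][1] if i < n-1 and chars[i]=='0' else 0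
def pvValB (zerosOnes : List (List Int)) (chars : String) (i : Nat) : Int :=
  if (i : Int) < (chars.toList.length : Int) - 1 ∧ PySem.Str.pyGet? chars (i : Int) = some '0' then
    PySem.List.pyGetD (PySem.List.pyGetD zerosOnes ((i : Int) + 1) []) 1 0
  else 0

-- literal port of Source B: total = sum of val(i) over a forward pass, then a second
-- forward pass appending total - pref and advancing pref by val(i).
def getTypeOne_alt (zerosOnes : List (List Int)) (chars : String) : List Int :=
  let n : Nat := chars.toList.length
  let total : Int := ((List.range n).map (pvValB zerosOnes chars)).sum
  ((List.range n).foldl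
    (fun (st : Int × List Int) i => (st.1 + pvValB zerosOnes chars i, st.2 ++ [total - st.1]))
    (0, [])).2

-- ===== PRECONDITION & SPEC =====
-- Pre_ excludes exactly the inputs where Python A raises IndexError: some i < len(chars)-1
-- has chars[i] == '0' but zerosOnes has no row i+1 of length ≥ 2. (B raises there too.)
def Pre_getTypeOne (zerosOnes : List (List Int)) (chars : String) : Prop :=
  ∀ i ∈ List.range (chars.toList.length - 1),
    chars.toList[i]? = some '0' →
      i + 1 < zerosOnes.length ∧ 2 ≤ (zerosOnes.getD (i + 1) []).length
instance (zerosOnes : List (List Int)) (chars : String) : Decidable (Pre_getTypeOne zerosOnes chars) := by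
  unfold Pre_getTypeOne; infer_instance

def pvWitness_getTypeOne : List (List Int) × String := ([[0, 0], [1, 2], [3, 4]], "010")

def Spec_getTypeOne (zerosOnes : List (List Int)) (chars : String) (out : List Int) : Prop := out = getTypeOne_alt zerosOnes chars
instance (zerosOnes : List (List Int)) (chars : String) (out : List Int) : Decidable (Spec_getTypeOne zerosOnes chars out) := by unfold Spec_getTypeOne; infer_instance

-- ===== CLAIM (what is proved, stated in full; the proofs are below) =====
def Claim_equal_getTypeOne : Prop := ∀ (zerosOnes : List (List Int)) (chars : String), Dom_getTypeOne zerosOnes chars → Pre_getTypeOne zerosOnes chars → Spec_getTypeOne zerosOnes chars (getTypeOne zerosOnes chars)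

-- ===== LEMMAS AND PROOFS =====

-- the contribution at index i (0 outside 0 ≤ i < len-1), shared characterisation
def pvCv (zerosOnes : List (List Int)) (cs : List Char) (i : Nat) : Int :=
  if i + 1 < cs.length ∧ cs[i]? = some '0' then
    PySem.List.pyGetD (PySem.List.pyGetD zerosOnes ((i : Int) + 1) []) 1 0
  else 0

-- suffix sum of contributions from index j on
def pvS (zerosOnes : List (List Int)) (cs : List Char) (j : Nat) : Int :=
  if _h : j < cs.length then
    pvCv zerosOnes cs j + pvS zerosOnes cs (j + 1)
  else 0
termination_by cs.length - j

theorem pvS_ge (z : List (List Int)) (cs : List Char) (j : Nat) (h : cs.length ≤ j) :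
    pvS z cs j = 0 := by
  unfold pvS; simp [Nat.not_lt.mpr h]

theorem pvS_lt (z : List (List Int)) (cs : List Char) (j : Nat) (h : j < cs.length) :
    pvS z cs j = pvCv z cs j + pvS z cs (j + 1) := by
  conv_lhs => unfold pvS
  simp [h]

-- B's val helper computes the shared contribution function
theorem pvValB_eq (z : List (List Int)) (ch : String) (i : Nat) :
    pvValB z ch i = pvCv z ch.toList i := by
  unfold pvValB pvCv
  have hb : PySem.Str.pyGet? ch (i : Int) = ch.toList[i]? := by simp
  rw [hb]
  split_ifs with h1 h2 h2
  · rfl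
  · exact absurd ⟨by omega, h1.2⟩ h2
  · exact absurd ⟨by omega, h2.2⟩ h1
  · rfl

-- A's loop: after processing indices m-1 … 0, every entry below the string length
-- holds the suffix sum.
theorem loopA (z : List (List Int)) (ch : String) (m : Nat) (arr : List Int)
    (hm : m < ch.toList.length)
    (hlen : arr.length = ch.toList.length)
    (hup : ∀ j, m ≤ j → j < ch.toList.length → arr.getD j 0 = pvS z ch.toList j)
    (hlo : ∀ j, j < m → arr.getD j 0 = 0) :
    ((PySem.List.pyRange ((m : Int) - 1) (-1) (-1)).foldl
        (fun arr i =>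
          let bit := PySem.Str.pyGet? ch i
          let arr :=
            if bit = some '0' then
              PySem.List.pySetD arr i (PySem.List.pyGetD (PySem.List.pyGetD z (i + 1) []) 1 0)
            else arr
          PySem.List.pySetD arr i (PySem.List.pyGetD arr i 0 + PySem.List.pyGetD arr (i + 1) 0))
        arr).length = ch.toList.length ∧
    ∀ j, j < ch.toList.length →
      ((PySem.List.pyRange ((m : Int) - 1) (-1) (-1)).foldl
        (fun arr i =>
          let bit := PySem.Str.pyGet? ch i
          let arr :=
            if bit = some '0' then
              PySem.List.pySetD arr i (PySem.List.pyGetD (PySem.List.pyGetD z (i + 1) []) 1 0)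
            else arr
          PySem.List.pySetD arr i (PySem.List.pyGetD arr i 0 + PySem.List.pyGetD arr (i + 1) 0))
        arr).getD j 0 = pvS z ch.toList j := by
  induction m generalizing arr with
  | zero =>
      rw [PySem.List.pyRange_neg_one_eq_nil (by omega)]
      exact ⟨hlen, fun j hj => hup j (Nat.zero_le j) hj⟩
  | succ m ih =>
      have hcons : PySem.List.pyRange (((m + 1 : Nat) : Int) - 1) (-1) (-1)
          = (m : Int) :: PySem.List.pyRange ((m : Int) - 1) (-1) (-1) := by
        push_cast
        rw [show ((m : Int) + 1 - 1) = (m : Int) by ring]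
        exact PySem.List.pyRange_neg_one_cons (by omega)
      rw [hcons, List.foldl_cons]
      have hmn : m < ch.toList.length := Nat.lt_of_succ_lt hm
      -- the state after processing index m
      set A2 : List Int :=
        if PySem.Str.pyGet? ch (m : Int) = some '0' then
          PySem.List.pySetD arr (m : Int)
            (PySem.List.pyGetD (PySem.List.pyGetD z ((m : Int) + 1) []) 1 0)
        else arr with hA2
      clear_value A2
      have hA2len : A2.length = ch.toList.length := by
        rw [hA2]; split_ifs <;> simp [hlen]
      have hA2get : ∀ j, j < ch.toList.length →
          A2.getD j 0 = if j = m ∧ PySem.Str.pyGet? ch (m : Int) = some '0' then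
              PySem.List.pyGetD (PySem.List.pyGetD z ((m : Int) + 1) []) 1 0
            else arr.getD j 0 := by
        intro j hj
        rw [hA2]
        have hset := PySem.List.pyGetD_pySetD_natCast (xs := arr) (n := m)
          (v := PySem.List.pyGetD (PySem.List.pyGetD z ((m : Int) + 1) []) 1 0)
          (m := j) (d := 0) (by omega)
        simp only [PySem.List.pyGetD_natCast] at hset
        split_ifs with h1 h2 h2
        · rw [hset]; simp [h2.1]
        · rw [hset]
          have hne : ¬ (j = m) := fun hjm => h2 ⟨hjm, h1⟩
          simp [hne]
        · exact absurd h2.2 h1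
        · rfl
      -- the written value at index m is pvCv m + pvS (m+1)
      have hwrite : PySem.List.pyGetD A2 (m : Int) 0 + PySem.List.pyGetD A2 ((m : Int) + 1) 0
          = pvS z ch.toList m := by
        have g1 : PySem.List.pyGetD A2 (m : Int) 0 = pvCv z ch.toList m := by
          have := hA2get m hmn
          simp only [PySem.List.pyGetD_natCast] at this ⊢
          rw [this]
          unfold pvCv
          have hb : PySem.Str.pyGet? ch (m : Int) = ch.toList[m]? := by simp
          have hm' : m + 1 < ch.length := by simpa using hm
          by_cases hc : ch.toList[m]? = some '0'
          · simp [hc, hm']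
          · simp only [hb, hc, and_false, if_false]
            simp
            simpa [List.getD] using hlo m (Nat.lt_succ_self m)
        have g2 : PySem.List.pyGetD A2 ((m : Int) + 1) 0 = pvS z ch.toList (m + 1) := by
          have hcast : ((m : Int) + 1) = ((m + 1 : Nat) : Int) := by push_cast; ring
          rw [hcast]
          simp only [PySem.List.pyGetD_natCast]
          rw [hA2get (m + 1) hm]
          simp only [show ¬ (m + 1 = m) by omega, false_and, if_false]
          exact hup (m + 1) (Nat.le_refl _) hm
        rw [g1, g2, pvS_lt z ch.toList m hmn]
      -- apply the induction hypothesis to the new state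
      have harr' : (PySem.List.pySetD A2 (m : Int)
          (PySem.List.pyGetD A2 (m : Int) 0 + PySem.List.pyGetD A2 ((m : Int) + 1) 0)).length
            = ch.toList.length := by simp [hA2len]
      have hstep : (let bit := PySem.Str.pyGet? ch ((m : Nat) : Int)
          let arr :=
            if bit = some '0' then
              PySem.List.pySetD arr ((m : Nat) : Int)
                (PySem.List.pyGetD (PySem.List.pyGetD z (((m : Nat) : Int) + 1) []) 1 0)
            else arr
          PySem.List.pySetD arr ((m : Nat) : Int)
            (PySem.List.pyGetD arr ((m : Nat) : Int) 0 + PySem.List.pyGetD arr (((m : Nat) : Int) + 1) 0))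
          = PySem.List.pySetD A2 ((m : Nat) : Int)
              (PySem.List.pyGetD A2 ((m : Nat) : Int) 0 + PySem.List.pyGetD A2 (((m : Nat) : Int) + 1) 0) := by
        rw [hA2]
      rw [hstep]
      refine ih _ hmn harr' ?_ ?_
      · intro j hmj hj
        have hset := PySem.List.pyGetD_pySetD_natCast (xs := A2) (n := m)
          (v := PySem.List.pyGetD A2 (m : Int) 0 + PySem.List.pyGetD A2 ((m : Int) + 1) 0)
          (m := j) (d := 0) (by omega)
        simp only [PySem.List.pyGetD_natCast, PySem.List.pySetD_natCast] at hset ⊢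
        rw [hset]
        by_cases hjm : j = m
        · subst hjm; simp only [if_pos]
          rw [← hwrite]; simp
        · simp only [hjm, if_false]
          rw [hA2get j hj]
          simp only [hjm, false_and, if_false]
          exact hup j (by omega) hj
      · intro j hj
        have hset := PySem.List.pyGetD_pySetD_natCast (xs := A2) (n := m)
          (v := PySem.List.pyGetD A2 (m : Int) 0 + PySem.List.pyGetD A2 ((m : Int) + 1) 0)
          (m := j) (d := 0) (by omega)
        simp only [PySem.List.pyGetD_natCast, PySem.List.pySetD_natCast] at hset ⊢
        rw [hset]
        simp only [show j ≠ m by omega, if_false]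
        rw [hA2get j (by omega)]
        simp only [show ¬(j = m) by omega, false_and, if_false]
        exact hlo j (by omega)

-- prefix sum of B's contributions
def pvP (z : List (List Int)) (ch : String) (k : Nat) : Int :=
  ((List.range k).map (pvValB z ch)).sum

theorem pvP_succ (z : List (List Int)) (ch : String) (k : Nat) :
    pvP z ch (k + 1) = pvP z ch k + pvValB z ch k := by
  unfold pvP
  rw [List.range_succ]
  simp

-- B's forward fold: the state after range k is (prefix k, the first k outputs)
theorem foldB (z : List (List Int)) (ch : String) (T : Int) (k : Nat) :
    (List.range k).foldl
        (fun (st : Int × List Int) i => (st.1 + pvValB z ch i, st.2 ++ [T - st.1]))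
        (0, [])
      = (pvP z ch k, (List.range k).map (fun j => T - pvP z ch j)) := by
  induction k with
  | zero => simp [pvP]
  | succ k ih =>
      rw [List.range_succ, List.foldl_append, ih]
      simp [pvP_succ]

-- complement identity: total = prefix j + suffix j
theorem pvCompl (z : List (List Int)) (ch : String) :
    ∀ (d j : Nat), j + d = ch.toList.length →
      pvP z ch ch.toList.length = pvP z ch j + pvS z ch.toList j := by
  intro d
  induction d with
  | zero =>
      intro j hj
      rw [show j = ch.toList.length by omega, pvS_ge z ch.toList _ (Nat.le_refl _)]
      ring
  | succ d ih =>
      intro j hj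
      rw [ih (j + 1) (by omega), pvP_succ, pvS_lt z ch.toList j (by omega),
        pvValB_eq]
      ring

-- B's result: length and pointwise values
theorem altChar (z : List (List Int)) (ch : String) :
    (getTypeOne_alt z ch).length = ch.toList.length ∧
    ∀ j, j < ch.toList.length → (getTypeOne_alt z ch).getD j 0 = pvS z ch.toList j := by
  unfold getTypeOne_alt
  dsimp only []
  rw [foldB]
  constructor
  · simp
  · intro j hj
    rw [List.getD_eq_getElem _ 0 (by simpa using hj)]
    simp only [List.getElem_map, List.getElem_range]
    have := pvCompl z ch (ch.toList.length - j) j (by omega)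
    change pvP z ch ch.toList.length - pvP z ch j = _
    omega

-- ===== VERDICT (by name: the statement is the Claim_ definition above) =====
theorem getTypeOne_spec : Claim_equal_getTypeOne := by
  intro zerosOnes chars _hdom _hpre
  unfold Spec_getTypeOne
  obtain ⟨hBlen, hBget⟩ := altChar zerosOnes chars
  by_cases h0 : chars.toList.length = 0
  · unfold getTypeOne
    dsimp only []
    have : getTypeOne_alt zerosOnes chars = [] := by
      have := hBlen; rw [h0] at this
      exact List.eq_nil_of_length_eq_zero this
    rw [this]
    rw [PySem.List.pyRange_neg_one_eq_nil (by omega)]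
    simp [h0]
  · have hn : 0 < chars.toList.length := Nat.pos_of_ne_zero h0
    unfold getTypeOne
    dsimp only []
    have hcast : ((chars.toList.length : Int) - 2)
        = (((chars.toList.length - 1 : Nat)) : Int) - 1 := by omega
    rw [hcast]
    have harrlen : ((List.range ((chars.toList.length : Int)).toNat).map
        (fun _ => (0 : Int))).length = chars.toList.length := by simp
    have hzget : ∀ j, ((List.range ((chars.toList.length : Int)).toNat).map
        (fun _ => (0 : Int))).getD j 0 = 0 := by
      intro j
      rcases Nat.lt_or_ge j chars.toList.length with hj | hj
      · rw [List.getD_eq_getElem _ 0 (by simpa using hj)]; simp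
      · rw [List.getD_eq_default _ 0 (by simpa using hj)]
    obtain ⟨hAlen, hAget⟩ := loopA zerosOnes chars (chars.toList.length - 1)
      ((List.range ((chars.toList.length : Int)).toNat).map (fun _ => (0 : Int)))
      (by omega) harrlen
      (by
        intro j hj1 hj2
        have hjeq : j = chars.toList.length - 1 := by omega
        rw [hzget j, hjeq, pvS_lt _ _ _ (by omega),
          pvS_ge _ _ _ (by omega)]
        unfold pvCv
        simp only [show ¬(chars.toList.length - 1 + 1 < chars.toList.length) by omega,
          false_and, if_false]
        ring)
      (fun j _ => hzget j)
    refine List.ext_getElem (by rw [hAlen, hBlen]) ?_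
    intro i h1 h2
    have hi : i < chars.toList.length := by rw [← hAlen]; exact h1
    have hA := hAget i hi
    have hB := hBget i hi
    rw [List.getD_eq_getElem _ 0 h1] at hA
    rw [List.getD_eq_getElem _ 0 h2] at hB
    rw [hA, hB]
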